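-- pv_equiv track=rewrite | github.com/danielteixeiralima/historias | teste.py | criar_paginas_historia
-- ===== SOURCE A (Python) =====
-- def criar_paginas_historia(historia, total_paginas):
--     # Dividir a história em sentenças baseadas no ponto final
--     sentencas = historia.split('. ')
--     total_sentencas = len(sentencas)
--     paginas = []
--     buffer = []
--
--     # Calcular o número mínimo de sentenças por página, ajustando para cobrir toda a história
--     base_sentencas_por_pagina = total_sentencas // total_paginas
--     extra_sentencas = total_sentencas % total_paginas  # Sentenças extras a distribuir
--
--     current_page_sentences = base_sentencas_por_pagina + (1 if extra_sentencas > 0 else 0)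
--
--     for i, sentenca in enumerate(sentencas):
--         buffer.append(sentenca if sentenca.endswith('.') else sentenca + '.')
--
--         if len(buffer) >= current_page_sentences and len(paginas) < total_paginas - 1:
--             # Adicionar a página atual quando atingir o limite
--             if buffer[-1].endswith('.'):
--                 paginas.append(" ".join(buffer).strip())
--                 buffer = []
--                 # Ajustar o número de sentenças para as páginas restantes
--                 extra_sentencas = max(0, extra_sentencas - 1)
--                 current_page_sentences = base_sentencas_por_pagina + (1 if extra_sentencas > 0 else 0)
--
--     # Adicionar as sentenças restantes na última página
--     if buffer:
--         paginas.append(" ".join(buffer).strip())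
--
--     # Garantir exatamente 14 páginas (adicionando páginas vazias, se necessário)
--     while len(paginas) < total_paginas:
--         paginas.append("")
--
--     return paginas
-- ===== SOURCE B (Python) =====
-- def criar_paginas_historia(historia, total_paginas):
--     # Precompute the page-size table with divmod, then cut consecutive slices;
--     # replaces A's streaming buffer/quota loop.
--     norm = [s if s.endswith('.') else s + '.' for s in historia.split('. ')]
--     base, extra = divmod(len(norm), total_paginas)
--     paginas = []
--     resto = norm
--     for i in range(total_paginas - 1):
--         n = base + (1 if i < extra else 0)
--         paginas.append(" ".join(resto[:n]).strip())
--         resto = resto[n:]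
--     paginas.append(" ".join(resto).strip())
--     return paginas
-- ===== Notes on version B (the rewrite author's own statement) =====
-- stated objective: simpler
-- what changed: Replaces A's streaming buffer/quota loop (running buffer, mutable extra/current counters, conditional page flush, final padding) by computing base,extra = divmod(n_sentences, total_paginas) once and cutting consecutive slices of the normalized sentence list, one per page.
import Mathlib
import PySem

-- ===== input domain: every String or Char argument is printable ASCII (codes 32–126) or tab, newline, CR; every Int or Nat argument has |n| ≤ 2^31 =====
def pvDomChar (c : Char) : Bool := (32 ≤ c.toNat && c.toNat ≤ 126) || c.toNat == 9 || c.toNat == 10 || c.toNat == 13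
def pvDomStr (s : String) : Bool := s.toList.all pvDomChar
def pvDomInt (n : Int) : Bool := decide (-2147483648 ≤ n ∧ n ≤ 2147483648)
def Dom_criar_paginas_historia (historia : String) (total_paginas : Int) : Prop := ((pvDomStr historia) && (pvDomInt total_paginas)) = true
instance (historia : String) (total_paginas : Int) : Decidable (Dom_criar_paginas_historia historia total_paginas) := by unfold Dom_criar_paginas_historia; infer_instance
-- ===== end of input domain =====

-- B replaces A's streaming buffer/quota loop by a divmod-precomputed page-size
-- table applied as consecutive slices (objective: simpler decomposition).

-- ===== PORT A =====
def criar_paginas_historia (historia : String) (total_paginas : Int) : List String :=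
  let sentencas := (PySem.Str.split? historia ". ").getD []   -- sep is non-empty, so split? is always `some`
  let total_sentencas : Int := (sentencas.length : Int)
  let base := PySem.Int.floordiv total_sentencas total_paginas
  let extra0 := PySem.Int.mod total_sentencas total_paginas
  let st := (PySem.List.enumerate sentencas).foldl
    (fun (st : List String × List String × Int × Int) p =>
      let sentenca := p.2
      let buffer := st.2.1 ++ [if PySem.Str.endswith sentenca "." then sentenca else sentenca ++ "."]
      if st.2.2.2 ≤ (buffer.length : Int) ∧ (st.1.length : Int) < total_paginas - 1 then
        if (match PySem.List.pyGet? buffer (-1) with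
            | some last => PySem.Str.endswith last "."
            | none => false) then
          let extra' := max 0 (st.2.2.1 - 1)
          (st.1 ++ [PySem.Str.strip (PySem.Str.join " " buffer)], ([] : List String),
           extra', base + (if 0 < extra' then 1 else 0))
        else (st.1, buffer, st.2.2.1, st.2.2.2)
      else (st.1, buffer, st.2.2.1, st.2.2.2))
    (([] : List String), ([] : List String), extra0, base + (if 0 < extra0 then 1 else 0))
  let paginas := if st.2.1.isEmpty then st.1 else st.1 ++ [PySem.Str.strip (PySem.Str.join " " st.2.1)]
  paginas ++ List.replicate (total_paginas - (paginas.length : Int)).toNat ""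

-- ===== PORT B =====
def criar_paginas_historia_alt (historia : String) (total_paginas : Int) : List String :=
  let norm := ((PySem.Str.split? historia ". ").getD []).map
      (fun s => if PySem.Str.endswith s "." then s else s ++ ".")
  match PySem.Int.divmod? (norm.length : Int) total_paginas with
  | none => []   -- ZeroDivisionError in Python; excluded by Pre_
  | some (base, extra) =>
    let st := (PySem.List.pyRange 0 (total_paginas - 1) 1).foldl
      (fun (st : List String × List String) i =>
        let n := base + (if i < extra then 1 else 0)
        (st.1 ++ [PySem.Str.strip (PySem.Str.join " " (PySem.List.slice st.2 none (some n)))],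
         PySem.List.slice st.2 (some n) none))
      (([] : List String), norm)
    st.1 ++ [PySem.Str.strip (PySem.Str.join " " st.2)]

-- ===== PRECONDITION & SPEC =====
-- Pre_ excludes only total_paginas = 0, where the Python A raises ZeroDivisionError.
def Pre_criar_paginas_historia (historia : String) (total_paginas : Int) : Prop := total_paginas ≠ 0
instance (historia : String) (total_paginas : Int) : Decidable (Pre_criar_paginas_historia historia total_paginas) := by unfold Pre_criar_paginas_historia; infer_instance
def pvWitness_criar_paginas_historia : String × Int := ("Um dia. Dois dias. Fim", 2)
def Spec_criar_paginas_historia (historia : String) (total_paginas : Int) (out : List String) : Prop := out = criar_paginas_historia_alt historia total_paginas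
instance (historia : String) (total_paginas : Int) (out : List String) : Decidable (Spec_criar_paginas_historia historia total_paginas out) := by unfold Spec_criar_paginas_historia; infer_instance

-- ===== CLAIM (what is proved, stated in full; the proofs are below) =====
def Claim_equal_criar_paginas_historia : Prop := ∀ (historia : String) (total_paginas : Int), Dom_criar_paginas_historia historia total_paginas → Pre_criar_paginas_historia historia total_paginas → Spec_criar_paginas_historia historia total_paginas (criar_paginas_historia historia total_paginas)

-- ===== LEMMAS AND PROOFS =====

-- Proof-side abbreviations for the pieces both ports share verbatim.
def pvNrm (s : String) : String := if PySem.Str.endswith s "." then s else s ++ "."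
def pvPg (l : List String) : String := PySem.Str.strip (PySem.Str.join " " l)

-- A's loop body (on the state (paginas, buffer, extra, current)).
def pvStepA (tp base : Int) (st : List String × List String × Int × Int) (sentenca : String) :
    List String × List String × Int × Int :=
  let buffer := st.2.1 ++ [pvNrm sentenca]
  if st.2.2.2 ≤ (buffer.length : Int) ∧ (st.1.length : Int) < tp - 1 then
    if (match PySem.List.pyGet? buffer (-1) with
        | some last => PySem.Str.endswith last "."
        | none => false) then
      let extra' := max 0 (st.2.2.1 - 1)
      (st.1 ++ [pvPg buffer], ([] : List String), extra', base + (if 0 < extra' then 1 else 0))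
    else (st.1, buffer, st.2.2.1, st.2.2.2)
  else (st.1, buffer, st.2.2.1, st.2.2.2)

-- A's tail: flush the buffer, pad with "" up to tp pages.
def pvFinA (tp : Int) (st : List String × List String × Int × Int) : List String :=
  let paginas := if st.2.1.isEmpty then st.1 else st.1 ++ [pvPg st.2.1]
  paginas ++ List.replicate (tp - (paginas.length : Int)).toNat ""

-- B's pages, recursively: j+1 pages remain to cut, page k gets base (+1 if k < e0) sentences.
def pvBgo (base e0 : Int) : Int → Nat → List String → List String
  | _, 0, rest => [pvPg rest]
  | k, j + 1, rest =>
      let n := (base + (if k < e0 then 1 else 0)).toNat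
      pvPg (rest.take n) :: pvBgo base e0 (k + 1) j (rest.drop n)

lemma pvPg_nil : pvPg [] = "" := by decide

lemma foldl_enumerate_snd {α β : Type} (f : β → α → β) :
    ∀ (xs : List α) (s : Int) (init : β),
      (PySem.List.enumerate xs s).foldl (fun st p => f st p.2) init = xs.foldl f init := by
  intro xs
  induction xs with
  | nil => intro s init; simp [PySem.List.enumerate_nil]
  | cons x t ih => intro s init; simp [PySem.List.enumerate_cons, ih]

lemma endswith_pvNrm (s : String) : PySem.Str.endswith (pvNrm s) "." = true := by
  unfold pvNrm
  split_ifs with h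
  · exact h
  · rw [PySem.Str.endswith_eq, PySem.Chars.endswith_iff, String.toList_append]
    exact List.suffix_append _ _

-- A's loop over `enumerate` ignores the index: it is a fold of pvStepA over the sentences.
lemma foldl_enumA (tp base : Int) (xs : List String)
    (init : List String × List String × Int × Int) :
    (PySem.List.enumerate xs).foldl
      (fun (st : List String × List String × Int × Int) (p : Int × String) =>
        if st.2.2.2 ≤ (((st.2.1 ++ [if PySem.Str.endswith p.2 "." then p.2 else p.2 ++ "."]).length : Nat) : Int) ∧
            ((st.1.length : Nat) : Int) < tp - 1 then
          if (match PySem.List.pyGet? (st.2.1 ++ [if PySem.Str.endswith p.2 "." then p.2 else p.2 ++ "."]) (-1) with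
              | some last => PySem.Str.endswith last "."
              | none => false) then
            (st.1 ++ [PySem.Str.strip (PySem.Str.join " "
                (st.2.1 ++ [if PySem.Str.endswith p.2 "." then p.2 else p.2 ++ "."]))],
             ([] : List String), max 0 (st.2.2.1 - 1),
             base + (if 0 < max 0 (st.2.2.1 - 1) then 1 else 0))
          else (st.1, st.2.1 ++ [if PySem.Str.endswith p.2 "." then p.2 else p.2 ++ "."], st.2.2.1, st.2.2.2)
        else (st.1, st.2.1 ++ [if PySem.Str.endswith p.2 "." then p.2 else p.2 ++ "."], st.2.2.1, st.2.2.2))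
      init = xs.foldl (pvStepA tp base) init := by
  have h : (fun (st : List String × List String × Int × Int) (p : Int × String) =>
        if st.2.2.2 ≤ (((st.2.1 ++ [if PySem.Str.endswith p.2 "." then p.2 else p.2 ++ "."]).length : Nat) : Int) ∧
            ((st.1.length : Nat) : Int) < tp - 1 then
          if (match PySem.List.pyGet? (st.2.1 ++ [if PySem.Str.endswith p.2 "." then p.2 else p.2 ++ "."]) (-1) with
              | some last => PySem.Str.endswith last "."
              | none => false) then
            (st.1 ++ [PySem.Str.strip (PySem.Str.join " "
                (st.2.1 ++ [if PySem.Str.endswith p.2 "." then p.2 else p.2 ++ "."]))],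
             ([] : List String), max 0 (st.2.2.1 - 1),
             base + (if 0 < max 0 (st.2.2.1 - 1) then 1 else 0))
          else (st.1, st.2.1 ++ [if PySem.Str.endswith p.2 "." then p.2 else p.2 ++ "."], st.2.2.1, st.2.2.2)
        else (st.1, st.2.1 ++ [if PySem.Str.endswith p.2 "." then p.2 else p.2 ++ "."], st.2.2.1, st.2.2.2)) =
      (fun st p => pvStepA tp base st p.2) := by
    funext st p
    rfl
  rw [h, foldl_enumerate_snd]

-- A's port, re-expressed through the named pieces (definitional).
lemma portA_eq (historia : String) (tp : Int) :
    criar_paginas_historia historia tp =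
      pvFinA tp ((((PySem.Str.split? historia ". ").getD []) : List String).foldl
        (pvStepA tp (PySem.Int.floordiv ((((PySem.Str.split? historia ". ").getD []).length : Nat) : Int) tp))
        (([] : List String), ([] : List String),
         PySem.Int.mod ((((PySem.Str.split? historia ". ").getD []).length : Nat) : Int) tp,
         PySem.Int.floordiv ((((PySem.Str.split? historia ". ").getD []).length : Nat) : Int) tp +
           (if 0 < PySem.Int.mod ((((PySem.Str.split? historia ". ").getD []).length : Nat) : Int) tp then 1 else 0))) := by
  unfold criar_paginas_historia
  simp only [foldl_enumA]
  rfl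

-- Once tp-1 pages exist, A's loop only accumulates into the buffer.
lemma pvStepA_low (tp base : Int) :
    ∀ (xs : List String) (p buf : List String) (e c : Int),
      tp - 1 ≤ (p.length : Int) →
      xs.foldl (pvStepA tp base) (p, buf, e, c) = (p, buf ++ xs.map pvNrm, e, c) := by
  intro xs
  induction xs with
  | nil => intro p buf e c _; simp
  | cons x t ih =>
    intro p buf e c hp
    have hcond : ¬ (c ≤ ((buf ++ [pvNrm x]).length : Int) ∧ (p.length : Int) < tp - 1) := by
      rintro ⟨-, h2⟩; omega
    simp only [List.foldl_cons, pvStepA, if_neg hcond]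
    rw [ih _ _ _ _ hp]
    simp

-- Processing one full chunk of `m = current` sentences closes exactly one page.
lemma pvStepA_chunk (tp base : Int) (m : Nat) :
    ∀ (xs pre buf : List String) (c : Int), xs ≠ [] → buf = pre.map pvNrm → c = (m : Int) →
      pre.length + xs.length = m →
    ∀ (p : List String) (e : Int) (ys : List String), (p.length : Int) < tp - 1 →
      (xs ++ ys).foldl (pvStepA tp base) (p, buf, e, c) =
      ys.foldl (pvStepA tp base)
        (p ++ [pvPg ((pre ++ xs).map pvNrm)], ([] : List String), max 0 (e - 1),
         base + (if 0 < max 0 (e - 1) then 1 else 0)) := by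
  intro xs
  induction xs with
  | nil => intro pre buf c h; exact absurd rfl h
  | cons x t ih =>
    intro pre buf c _ hbuf hc hlen p e ys hp
    subst hbuf hc
    cases t with
    | nil =>
      have hbuf2 : pre.map pvNrm ++ [pvNrm x] = (pre ++ [x]).map pvNrm := by simp
      have hm : ((pre.map pvNrm ++ [pvNrm x]).length : Int) = (m : Int) := by
        simp at hlen ⊢; omega
      have hcond : (m : Int) ≤ ((pre.map pvNrm ++ [pvNrm x]).length : Int) ∧
          (p.length : Int) < tp - 1 := by rw [hm]; exact ⟨le_refl _, hp⟩
      simp only [List.cons_append, List.nil_append, List.foldl_cons, pvStepA,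
        if_pos hcond, PySem.List.pyGet?_neg_one_append_singleton, endswith_pvNrm, if_pos]
      rw [hbuf2]
    | cons y t' =>
      have hcond : ¬ ((m : Int) ≤ ((pre.map pvNrm ++ [pvNrm x]).length : Int) ∧
          (p.length : Int) < tp - 1) := by
        rintro ⟨h1, -⟩
        simp at h1 hlen
        omega
      have hstep : pvStepA tp base (p, pre.map pvNrm, e, (m : Int)) x =
          (p, (pre ++ [x]).map pvNrm, e, (m : Int)) := by
        simp only [pvStepA, if_neg hcond]
        simp
      rw [List.cons_append, List.foldl_cons, hstep]
      have := ih (pre ++ [x]) ((pre ++ [x]).map pvNrm) (m : Int) (by simp) rfl rfl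
        (by simp at hlen ⊢; omega) p e ys hp
      simpa using this

-- When nothing is left and no sentences are owed, B's remaining pages are all "".
lemma pvBgo_empty (base e0 : Int) (hb : base = 0) :
    ∀ (j : Nat) (k : Int), e0 ≤ k → pvBgo base e0 k j [] = List.replicate (j + 1) "" := by
  intro j
  induction j with
  | zero => intro k _; simp [pvBgo, pvPg_nil]
  | succ j ih =>
    intro k hk
    have hn : (base + (if k < e0 then 1 else 0)).toNat = 0 := by
      rw [if_neg (by omega)]; omega
    simp only [pvBgo, hn, List.take_nil, List.drop_nil, pvPg_nil]
    rw [ih (k + 1) (by omega)]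
    rfl

-- Main invariant: with k pages already built, A's remaining run produces B's remaining pages.
lemma pvMain (tp base e0 : Int) (hbase : 0 ≤ base) :
    ∀ (j : Nat) (k : Int), k = tp - 1 - (j : Int) → 0 ≤ k →
    ∀ (rest p : List String),
      (rest.length : Int) = base * (tp - k) + max 0 (e0 - k) → (p.length : Int) = k →
      pvFinA tp (rest.foldl (pvStepA tp base)
          (p, ([] : List String), max 0 (e0 - k),
           base + (if 0 < max 0 (e0 - k) then 1 else 0))) =
      p ++ pvBgo base e0 k j (rest.map pvNrm) := by
  intro j
  induction j with
  | zero =>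
    intro k hk hk0 rest p hrest hp
    have hkk : k = tp - 1 := by push_cast at hk; omega
    rw [pvStepA_low tp base rest p [] _ _ (by omega)]
    cases rest with
    | nil =>
      simp only [List.map_nil, List.nil_append, pvFinA, List.isEmpty_nil, if_pos]
      have h1 : (tp - ((p.length : Nat) : Int)).toNat = 1 := by omega
      simp [pvBgo, h1, pvPg_nil]
    | cons r rs =>
      simp only [List.nil_append, pvFinA]
      have hne : ¬ (((r :: rs).map pvNrm).isEmpty = true) := by simp
      rw [if_neg hne]
      have h0 : (tp - (((p ++ [pvPg ((r :: rs).map pvNrm)]).length : Nat) : Int)).toNat = 0 := by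
        simp only [List.length_append, List.length_cons, List.length_nil]
        push_cast
        omega
      rw [h0]
      simp [pvBgo]
  | succ j ih =>
    intro k hk hk0 rest p hrest hp
    have hk2 : k ≤ tp - 2 := by push_cast at hk; omega
    have hprod : base * (tp - k) = base * (tp - (k + 1)) + base := by ring
    have hprodnn : 0 ≤ base * (tp - (k + 1)) := by
      apply mul_nonneg hbase; push_cast at hk; omega
    by_cases hre : rest = []
    · -- nothing left: base = 0 and e0 ≤ k; A pads, B emits "" pages
      subst hre
      have heq : (0 : Int) = base * (tp - (k + 1)) + base + max 0 (e0 - k) := by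
        have h' := hrest
        simp only [List.length_nil, Nat.cast_zero] at h'
        rw [hprod] at h'
        linarith
      have hb0 : base = 0 :=
        le_antisymm (by linarith [le_max_left (0 : Int) (e0 - k)]) hbase
      have hek : e0 ≤ k := by
        have hmx : e0 - k ≤ max 0 (e0 - k) := le_max_right _ _
        linarith
      simp only [List.foldl_nil, List.map_nil, pvFinA, List.isEmpty_nil, if_pos]
      rw [pvBgo_empty base e0 hb0 (j + 1) k hek]
      have h2 : (tp - ((p.length : Nat) : Int)).toNat = j + 2 := by push_cast at hk ⊢; omega
      rw [h2]
    · -- cut the next chunk of n sentences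
      have hrpos : 0 < rest.length := List.length_pos_of_ne_nil hre
      set n : Int := base + (if k < e0 then 1 else 0) with hn
      have hn1 : 1 ≤ n := by
        rw [hn]; by_cases h : k < e0
        · rw [if_pos h]; omega
        · rw [if_neg h]
          have hm0 : max 0 (e0 - k) = 0 := by omega
          by_contra hb
          have hb0 : base = 0 := by omega
          have hz : (rest.length : Int) = 0 := by rw [hrest, hm0, hb0]; ring
          omega
      have hnle : n ≤ (rest.length : Int) := by
        rw [hrest, hn]; by_cases h : k < e0
        · rw [if_pos h]
          have h1 : max 0 (e0 - k) = e0 - k := by omega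
          nlinarith [hprodnn, hprod]
        · rw [if_neg h]
          nlinarith [hprodnn, hprod, le_max_left (0 : Int) (e0 - k)]
      have hcureq : base + (if 0 < max 0 (e0 - k) then 1 else 0) = ((n.toNat : Nat) : Int) := by
        rw [hn]
        by_cases h : k < e0
        · rw [if_pos h, if_pos (by omega)]
          rw [hn] at hn1
          omega
        · rw [if_neg h, if_neg (by omega)]
          rw [hn] at hn1
          omega
      have hsplit : rest = rest.take n.toNat ++ rest.drop n.toNat := (List.take_append_drop _ _).symm
      have htl : (rest.take n.toNat).length = n.toNat := by
        rw [List.length_take]; omega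
      have hchne : rest.take n.toNat ≠ [] := by
        intro h; rw [h] at htl; simp at htl; omega
      conv_lhs => rw [hsplit]
      rw [pvStepA_chunk tp base n.toNat (rest.take n.toNat) [] [] _ hchne (by simp) hcureq
        (by simpa using htl) p (max 0 (e0 - k)) (rest.drop n.toNat) (by omega)]
      have hmax : max 0 (max 0 (e0 - k) - 1) = max 0 (e0 - (k + 1)) := by omega
      rw [hmax]
      rw [ih (k + 1) (by push_cast at hk ⊢; omega) (by omega) (rest.drop n.toNat)
        (p ++ [pvPg ((([] : List String) ++ rest.take n.toNat).map pvNrm)])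
        (by
          rw [List.length_drop]
          have hle : n.toNat ≤ rest.length := by omega
          have hcast : ((rest.length - n.toNat : Nat) : Int) = (rest.length : Int) - n := by
            push_cast [hle]
            omega
          rw [hcast, hrest, hprod]
          by_cases h : k < e0
          · have h1 : max 0 (e0 - k) = e0 - k := by omega
            have h2 : max 0 (e0 - (k + 1)) = e0 - (k + 1) := by omega
            rw [h1, h2, hn, if_pos h]; ring
          · have h1 : max 0 (e0 - k) = 0 := by omega
            have h2 : max 0 (e0 - (k + 1)) = 0 := by omega
            rw [h1, h2, hn, if_neg h]; ring)
        (by simp; omega)]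
      simp only [List.nil_append, pvBgo, List.append_assoc, List.singleton_append]
      rw [← hn, ← List.map_take, ← List.map_drop]

-- B's slicing loop equals pvBgo.
lemma pvBfold (tp base e0 : Int) (hbase : 0 ≤ base) :
    ∀ (j : Nat) (k : Int), k = tp - 1 - (j : Int) →
    ∀ (acc rest : List String),
      (let st := (PySem.List.pyRange k (tp - 1) 1).foldl
        (fun (st : List String × List String) i =>
          let n := base + (if i < e0 then 1 else 0)
          (st.1 ++ [PySem.Str.strip (PySem.Str.join " " (PySem.List.slice st.2 none (some n)))],
           PySem.List.slice st.2 (some n) none))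
        (acc, rest)
       st.1 ++ [PySem.Str.strip (PySem.Str.join " " st.2)]) =
      acc ++ pvBgo base e0 k j rest := by
  intro j
  induction j with
  | zero =>
    intro k hk acc rest
    rw [PySem.List.pyRange_one_eq_nil (by omega)]
    simp [pvBgo, pvPg]
  | succ j ih =>
    intro k hk acc rest
    have hklt : k < tp - 1 := by push_cast at hk; omega
    rw [PySem.List.pyRange_one_cons hklt]
    have hn : 0 ≤ base + (if k < e0 then 1 else 0) := by
      by_cases h : k < e0
      · rw [if_pos h]; omega
      · rw [if_neg h]; omega
    simp only [List.foldl_cons]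
    rw [PySem.List.slice_to rest hn, PySem.List.slice_from rest hn]
    rw [ih (k + 1) (by push_cast at hk ⊢; omega)]
    simp [pvBgo, pvPg]

-- split('. ') never yields the empty list.
lemma splitOn_go_ne_nil (sep : List Char) :
    ∀ (fuel : Nat) (l cur : List Char) (acc : List (List Char)),
      PySem.Chars.splitOn.go sep fuel l cur acc ≠ [] := by
  intro fuel
  induction fuel with
  | zero => intro l cur acc; rw [PySem.Chars.splitOn.go.eq_def]; simp
  | succ fuel ih =>
    intro l cur acc
    rw [PySem.Chars.splitOn.go.eq_def]
    cases l with
    | nil => simp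
    | cons c rest =>
      simp only []
      split_ifs
      · exact ih _ _ _
      · exact ih _ _ _

lemma sentencas_ne_nil (historia : String) :
    (PySem.Str.split? historia ". ").getD [] ≠ [] := by
  rw [PySem.Str.split?]
  rw [PySem.Chars.split?]
  rw [if_neg (by decide)]
  simp only [Option.map_some, Option.getD_some]
  intro h
  exact splitOn_go_ne_nil _ _ _ _ _ (by simpa using h)

-- ===== VERDICT (by name: the statement is the Claim_ definition above) =====
theorem criar_paginas_historia_spec : Claim_equal_criar_paginas_historia := by
  intro historia tp _ hpre
  unfold Spec_criar_paginas_historia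
  rw [portA_eq]
  set sentencas := (PySem.Str.split? historia ". ").getD [] with hsent
  set N : Int := (sentencas.length : Int) with hN
  set base := PySem.Int.floordiv N tp with hbase
  set e0 := PySem.Int.mod N tp with he0
  have hNnn : 0 ≤ N := by rw [hN]; positivity
  have hdm : base * tp + e0 = N := PySem.Int.floordiv_mul_add_mod N tp
  -- unfold B
  unfold criar_paginas_historia_alt
  simp only [PySem.Int.divmod?]
  rw [if_neg hpre]
  have hfd : N.fdiv tp = base := by
    rw [hbase, PySem.Int.floordiv]
  have hfm : N.fmod tp = e0 := by
    rw [he0, PySem.Int.mod]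
  have hmapl : ((sentencas.map
      (fun s => if PySem.Str.endswith s "." then s else s ++ ".")).length : Int) = N := by
    simp [hN]
  rw [← hsent]
  simp only [hmapl, hfd, hfm]
  by_cases htp : 1 ≤ tp
  · -- tp ≥ 1 : the main induction
    have htppos : (0 : Int) < tp := by omega
    have hbnn : 0 ≤ base := by
      rw [hbase, PySem.Int.floordiv_eq_ediv_of_pos htppos]
      exact Int.ediv_nonneg hNnn (by omega)
    have he0nn : 0 ≤ e0 := by
      rw [he0, PySem.Int.mod_eq_emod_of_pos htppos]
      exact Int.emod_nonneg N (by omega)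
    have he0lt : e0 < tp := by
      rw [he0, PySem.Int.mod_eq_emod_of_pos htppos]
      exact Int.emod_lt_of_pos N htppos
    have h1 := pvMain tp base e0 hbnn (tp - 1).toNat 0
      (by omega) le_rfl sentencas []
      (by simp [← hN]; omega) (by simp)
    have h2 := pvBfold tp base e0 hbnn (tp - 1).toNat 0 (by omega) []
      (sentencas.map (fun s => if PySem.Str.endswith s "." then s else s ++ "."))
    simp only [List.nil_append] at h1 h2
    have hmax0 : max 0 (e0 - 0) = e0 := by omega
    rw [hmax0] at h1
    have hnorm : sentencas.map (fun s => if PySem.Str.endswith s "." then s else s ++ ".") =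
        sentencas.map pvNrm := by
      simp [pvNrm]
    rw [hnorm] at h2 ⊢
    rw [h1, ← h2]
  · -- tp ≤ -1 : A never closes a page; B's range loop is empty
    have htpn : tp ≤ -1 := by have hpre2 : tp ≠ 0 := hpre; omega
    rw [pvStepA_low tp base sentencas [] [] e0 (base + if 0 < e0 then 1 else 0)
      (by simp only [List.length_nil, Nat.cast_zero]; omega)]
    rw [PySem.List.pyRange_one_eq_nil (by omega)]
    simp only [List.foldl_nil, pvFinA, List.nil_append]
    have hne : (sentencas.map pvNrm).isEmpty = false := by
      simp [sentencas_ne_nil historia, hsent]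
    have hnorm : sentencas.map (fun s => if PySem.Str.endswith s "." then s else s ++ ".") =
        sentencas.map pvNrm := by simp [pvNrm]
    rw [hnorm, hne]
    simp only [Bool.false_eq_true, if_false]
    have h0 : (tp - ((([pvPg (sentencas.map pvNrm)] : List String)).length : Int)).toNat = 0 := by
      simp only [List.length_cons, List.length_nil]
      omega
    rw [h0]
    simp [pvPg]
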